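-- pv_equiv track=rewrite | github.com/T-Srikanth/DSML | A7.py | max_subarray_count
-- ===== SOURCE A (Python) =====
-- def max_subarray_count(A, B):
--   count = 0
--   n = len(A)
--   for i in range(n):
--     sum = 0
--     for j in range(i, n):
--       sum += A[j]
--       if (sum <= B):
--         count += 1
--       else:
--         break
--   return count
-- ===== SOURCE B (Python) =====
-- def _build(lo, vs):
--     # segment tree node covering indices lo..lo+len(vs)-1; returns ('leaf', i, v) or ('node', mx, l, r)
--     if len(vs) == 1:
--         return ('leaf', lo, vs[0])
--     m = len(vs) // 2
--     l = _build(lo, vs[:m])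
--     r = _build(lo + m, vs[m:])
--     return ('node', max(_mx(l), _mx(r)), l, r)
--
-- def _mx(t):
--     return t[2] if t[0] == 'leaf' else t[1]
--
-- def _first_above(t, l, thr):
--     # leftmost stored index i >= l with value > thr, or None
--     if t[0] == 'leaf':
--         return t[1] if t[1] >= l and t[2] > thr else None
--     if t[1] <= thr:
--         return None
--     res = _first_above(t[2], l, thr)
--     if res is not None:
--         return res
--     return _first_above(t[3], l, thr)
--
-- def max_subarray_count(A, B):
--     n = len(A)
--     if n == 0:
--         return 0
--     P = []
--     s = 0
--     for a in A:
--         s += a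
--         P.append(s)          # P[i] holds prefix sum of A[0..i], i.e. classic P[i+1]
--     tree = _build(1, P)
--     total = 0
--     prev = 0                 # prefix sum before position i
--     for i in range(n):
--         k = _first_above(tree, i + 1, prev + B)
--         if k is None:
--             k = n + 1
--         total += k - (i + 1)
--         prev = P[i]
--     return total
-- ===== Notes on version B (the rewrite author's own statement) =====
-- stated objective: alternative
-- what changed: B precomputes prefix sums and answers each start position with a segment-tree 'leftmost index whose prefix sum exceeds threshold' descent, instead of restarting A's inner summation loop at every start.
import Mathlib
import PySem

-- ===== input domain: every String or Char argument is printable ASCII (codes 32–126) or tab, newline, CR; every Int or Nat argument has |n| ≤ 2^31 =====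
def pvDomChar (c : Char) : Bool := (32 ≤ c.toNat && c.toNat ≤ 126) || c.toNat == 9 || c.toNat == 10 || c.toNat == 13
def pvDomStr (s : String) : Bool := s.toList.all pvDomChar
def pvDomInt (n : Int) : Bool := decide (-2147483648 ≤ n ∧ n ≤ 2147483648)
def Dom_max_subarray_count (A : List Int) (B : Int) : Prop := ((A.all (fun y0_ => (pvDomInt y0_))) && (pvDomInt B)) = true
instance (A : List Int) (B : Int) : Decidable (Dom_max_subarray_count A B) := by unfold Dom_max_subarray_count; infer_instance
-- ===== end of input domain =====

-- B replaces A's restarted inner summation by prefix sums plus a segment-tree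
-- "leftmost prefix-sum index above threshold" descent per start (alternative algorithm).

-- ===== PORT A =====
-- inner loop: for j in range(i, n): sum += A[j]; count or break
def pvInnerA (B : Int) (sum : Int) : List Int → Int
  | [] => 0
  | a :: rest =>
    let s := sum + a
    if s ≤ B then 1 + pvInnerA B s rest else 0

-- outer loop: for i in range(n)
def pvOuterA (B : Int) : List Int → Int
  | [] => 0
  | a :: rest => pvInnerA B 0 (a :: rest) + pvOuterA B rest

def max_subarray_count (A : List Int) (B : Int) : Int := pvOuterA B A

-- ===== PORT B =====
inductive PvSeg where
  | leaf : Nat → Int → PvSeg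
  | node : Int → PvSeg → PvSeg → PvSeg
deriving Repr

def pvSegMax : PvSeg → Int
  | .leaf _ v => v
  | .node mx _ _ => mx

-- Source B _build
def pvBuild (lo : Nat) (vs : List Int) : PvSeg :=
  match vs with
  | [] => .leaf lo 0   -- unreachable (Source B never builds on an empty list)
  | [v] => .leaf lo v
  | v₁ :: v₂ :: rest =>
    let m := (v₁ :: v₂ :: rest).length / 2
    let l := pvBuild lo ((v₁ :: v₂ :: rest).take m)
    let r := pvBuild (lo + m) ((v₁ :: v₂ :: rest).drop m)
    .node (max (pvSegMax l) (pvSegMax r)) l r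
termination_by vs.length
decreasing_by
  · simp; omega
  · simp; omega

-- Source B _first_above
def pvFirstAbove : PvSeg → Nat → Int → Option Nat
  | .leaf i v, l, thr => if l ≤ i ∧ thr < v then some i else none
  | .node mx a b, l, thr =>
    if mx ≤ thr then none
    else
      match pvFirstAbove a l thr with
      | some i => some i
      | none => pvFirstAbove b l thr

-- Source B prefix-sum accumulation loop (the list P)
def pvPrefix (s : Int) : List Int → List Int
  | [] => []
  | a :: r => (s + a) :: pvPrefix (s + a) r

-- Source B main loop over i in range(n), carrying prev = P[i-1]
def pvLoopB (t : PvSeg) (n : Nat) (B : Int) : Nat → Int → List Int → Int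
  | _, _, [] => 0
  | i, prev, p :: rest =>
    let k := (pvFirstAbove t (i + 1) (prev + B)).getD (n + 1)
    ((k : Int) - ((i + 1 : Nat) : Int)) + pvLoopB t n B (i + 1) p rest

def max_subarray_count_alt (A : List Int) (B : Int) : Int :=
  match A with
  | [] => 0
  | _ :: _ =>
    let P := pvPrefix 0 A
    pvLoopB (pvBuild 1 P) A.length B 0 0 P

-- ===== PRECONDITION & SPEC =====
def Spec_max_subarray_count (A : List Int) (B : Int) (out : Int) : Prop := out = max_subarray_count_alt A B
instance (A : List Int) (B : Int) (out : Int) : Decidable (Spec_max_subarray_count A B out) := by unfold Spec_max_subarray_count; infer_instance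

-- ===== CLAIM (what is proved, stated in full; the proofs are below) =====
def Claim_equal_max_subarray_count : Prop := ∀ (A : List Int) (B : Int), Dom_max_subarray_count A B → Spec_max_subarray_count A B (max_subarray_count A B)

-- ===== LEMMAS AND PROOFS =====

-- linear-scan specification of the tree query
def pvFind (lo l : Nat) (thr : Int) : List Int → Option Nat
  | [] => none
  | v :: r => if l ≤ lo ∧ thr < v then some lo else pvFind (lo + 1) l thr r

lemma pvFind_append (xs ys : List Int) : ∀ (lo l : Nat) (thr : Int),
    pvFind lo l thr (xs ++ ys) = (pvFind lo l thr xs).or (pvFind (lo + xs.length) l thr ys) := by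
  induction xs with
  | nil => intro lo l thr; simp [pvFind]
  | cons x xs ih =>
    intro lo l thr
    by_cases h : l ≤ lo ∧ thr < x
    · simp [pvFind, h]
    · simp only [List.cons_append, pvFind, if_neg h, ih, List.length_cons]
      ring_nf

lemma pvFind_none_of_le (vs : List Int) : ∀ (lo l : Nat) (thr : Int),
    (∀ v ∈ vs, v ≤ thr) → pvFind lo l thr vs = none := by
  induction vs with
  | nil => intro lo l thr _; rfl
  | cons v r ih =>
    intro lo l thr h
    have hv : v ≤ thr := h v (by simp)
    have : ¬ (l ≤ lo ∧ thr < v) := by omega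
    simp [pvFind, this]
    exact ih _ _ _ (fun w hw => h w (by simp [hw]))

lemma pvSegMax_build (k : Nat) : ∀ (vs : List Int), vs.length ≤ k →
    ∀ (lo : Nat) (v : Int), v ∈ vs → v ≤ pvSegMax (pvBuild lo vs) := by
  induction k with
  | zero => intro vs h lo v hv; cases vs <;> simp_all
  | succ k ih =>
    intro vs h lo v hv
    match vs with
    | [] => simp_all
    | [w] => simp_all [pvBuild, pvSegMax]
    | w₁ :: w₂ :: rest =>
      rw [pvBuild]
      simp only [pvSegMax]
      set m := (w₁ :: w₂ :: rest).length / 2 with hm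
      have hsplit : (w₁ :: w₂ :: rest).take m ++ (w₁ :: w₂ :: rest).drop m = w₁ :: w₂ :: rest :=
        List.take_append_drop _ _
      have hv' : v ∈ (w₁ :: w₂ :: rest).take m ∨ v ∈ (w₁ :: w₂ :: rest).drop m := by
        rw [← List.mem_append, hsplit]; exact hv
      have hlen : (w₁ :: w₂ :: rest).length = rest.length + 2 := by simp
      rcases hv' with h1 | h1
      · exact le_max_of_le_left (ih ((w₁ :: w₂ :: rest).take m) (by simp; omega) lo v h1)
      · exact le_max_of_le_right (ih ((w₁ :: w₂ :: rest).drop m) (by simp; omega) (lo + m) v h1)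

lemma pvFirstAbove_build (k : Nat) : ∀ (vs : List Int), vs.length ≤ k → vs ≠ [] →
    ∀ (lo l : Nat) (thr : Int),
    pvFirstAbove (pvBuild lo vs) l thr = pvFind lo l thr vs := by
  induction k with
  | zero => intro vs h hne; cases vs <;> simp_all
  | succ k ih =>
    intro vs h hne lo l thr
    match vs with
    | [] => simp_all
    | [w] =>
      simp [pvBuild, pvFirstAbove, pvFind]
    | w₁ :: w₂ :: rest =>
      rw [pvBuild]
      simp only [pvFirstAbove]
      set m := (w₁ :: w₂ :: rest).length / 2 with hm
      have hlen : (w₁ :: w₂ :: rest).length = rest.length + 2 := by simp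
      have hmle : m ≤ (w₁ :: w₂ :: rest).length := by omega
      have htk : ((w₁ :: w₂ :: rest).take m).length = m := by simp; omega
      have htkne : (w₁ :: w₂ :: rest).take m ≠ [] := by
        intro hx; rw [hx] at htk; simp at htk; omega
      have hdrne : (w₁ :: w₂ :: rest).drop m ≠ [] := by
        intro hx
        have := congrArg List.length hx
        simp at this; omega
      have hA := ih ((w₁ :: w₂ :: rest).take m) (by simp; omega) htkne lo l thr
      have hB := ih ((w₁ :: w₂ :: rest).drop m) (by simp; omega) hdrne (lo + m) l thr
      by_cases hmx : max (pvSegMax (pvBuild lo ((w₁ :: w₂ :: rest).take m)))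
          (pvSegMax (pvBuild (lo + m) ((w₁ :: w₂ :: rest).drop m))) ≤ thr
      · rw [if_pos hmx]
        have hall : ∀ v ∈ (w₁ :: w₂ :: rest), v ≤ thr := by
          intro v hv
          have hsplit : (w₁ :: w₂ :: rest).take m ++ (w₁ :: w₂ :: rest).drop m = w₁ :: w₂ :: rest :=
            List.take_append_drop _ _
          have hv' : v ∈ (w₁ :: w₂ :: rest).take m ∨ v ∈ (w₁ :: w₂ :: rest).drop m := by
            rw [← List.mem_append, hsplit]; exact hv
          rcases hv' with h1 | h1
          · have := pvSegMax_build k ((w₁ :: w₂ :: rest).take m) (by simp; omega) lo v h1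
            omega
          · have := pvSegMax_build k ((w₁ :: w₂ :: rest).drop m) (by simp; omega) (lo + m) v h1
            omega
        exact (pvFind_none_of_le _ _ _ _ hall).symm
      · rw [if_neg hmx]
        conv_rhs =>
          rw [← List.take_append_drop m (w₁ :: w₂ :: rest), pvFind_append]
        rw [hA, hB, htk]
        cases pvFind lo l thr ((w₁ :: w₂ :: rest).take m) <;> simp [Option.or]

lemma pvFind_skip (j : Nat) : ∀ (vs : List Int) (lo l : Nat) (thr : Int), lo + j ≤ l →
    pvFind lo l thr vs = pvFind (lo + j) l thr (vs.drop j) := by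
  induction j with
  | zero => intro vs lo l thr _; simp
  | succ j ih =>
    intro vs lo l thr h
    match vs with
    | [] => simp [pvFind]
    | v :: r =>
      have : ¬ (l ≤ lo ∧ thr < v) := by omega
      simp only [pvFind, if_neg this, List.drop_succ_cons]
      rw [ih r (lo + 1) l thr (by omega)]
      ring_nf

lemma pvFind_getD (vs : List Int) : ∀ (lo l : Nat) (thr : Int), l ≤ lo →
    (pvFind lo l thr vs).getD (lo + vs.length)
      = lo + ((vs.takeWhile (fun v => decide (v ≤ thr))).length) := by
  induction vs with
  | nil => intro lo l thr _; simp [pvFind]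
  | cons v r ih =>
    intro lo l thr hl
    by_cases hv : thr < v
    · have : (l ≤ lo ∧ thr < v) := ⟨hl, hv⟩
      simp [pvFind, this]
    · have hcond : ¬ (l ≤ lo ∧ thr < v) := by omega
      simp only [pvFind, if_neg hcond, List.takeWhile_cons, List.length_cons]
      have hdec : decide (v ≤ thr) = true := by simp; omega
      rw [hdec]
      have hd : lo + (r.length + 1) = (lo + 1) + r.length := by omega
      rw [hd, ih (lo + 1) l thr (by omega)]
      simp
      omega

lemma pvInnerA_eq (l : List Int) : ∀ (B s : Int),
    pvInnerA B s l = ((pvPrefix s l).takeWhile (fun v => decide (v ≤ B))).length := by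
  induction l with
  | nil => intro B s; simp [pvInnerA, pvPrefix]
  | cons a r ih =>
    intro B s
    by_cases h : s + a ≤ B
    · simp [pvInnerA, pvPrefix, h, ih]
      omega
    · simp [pvInnerA, pvPrefix, h]

lemma pvPrefix_shift (l : List Int) : ∀ (x y : Int),
    pvPrefix (x + y) l = (pvPrefix y l).map (· + x) := by
  induction l with
  | nil => intro x y; simp [pvPrefix]
  | cons a r ih =>
    intro x y
    simp only [pvPrefix, List.map_cons]
    have h1 : x + y + a = x + (y + a) := by ring
    rw [h1, ih x (y + a)]
    congr 1
    ring

lemma takeWhile_map_length (xs : List Int) : ∀ (c B : Int),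
    (((xs.map (· + c)).takeWhile (fun v => decide (v ≤ c + B))).length)
      = ((xs.takeWhile (fun v => decide (v ≤ B))).length) := by
  induction xs with
  | nil => intro c B; simp
  | cons x r ih =>
    intro c B
    by_cases h : x ≤ B
    · have h' : x + c ≤ c + B := by omega
      simp [h, h', ih]
    · have h' : ¬ (x + c ≤ c + B) := by omega
      simp [h, h']

lemma pvPrefix_length (l : List Int) : ∀ s, (pvPrefix s l).length = l.length := by
  induction l with
  | nil => intro s; rfl
  | cons a r ih => intro s; simp [pvPrefix, ih]

lemma pvPrefix_drop (l : List Int) : ∀ (i : Nat) (s : Int),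
    (pvPrefix s l).drop i = pvPrefix (s + (l.take i).sum) (l.drop i) := by
  induction l with
  | nil => intro i s; simp [pvPrefix]
  | cons a r ih =>
    intro i s
    cases i with
    | zero => simp
    | succ i =>
      simp only [pvPrefix, List.drop_succ_cons, List.take_succ_cons, List.sum_cons]
      rw [ih i (s + a)]
      ring_nf

lemma pvLoop_eq (d : Nat) : ∀ (A : List Int) (B : Int) (i : Nat),
    A.length - i = d → i ≤ A.length → A ≠ [] →
    pvLoopB (pvBuild 1 (pvPrefix 0 A)) A.length B i ((A.take i).sum) ((pvPrefix 0 A).drop i)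
      = pvOuterA B (A.drop i) := by
  induction d with
  | zero =>
    intro A B i hd hle hne
    have h1 : (pvPrefix 0 A).drop i = [] := by
      apply List.drop_eq_nil_of_le; rw [pvPrefix_length]; omega
    have h2 : A.drop i = [] := List.drop_eq_nil_of_le (by omega)
    rw [h1, h2]; rfl
  | succ d ih =>
    intro A B i hd hle hne
    have hi : i < A.length := by omega
    have hdropA : A.drop i = A[i] :: A.drop (i + 1) := List.drop_eq_getElem_cons hi
    have hsum : (A.take (i + 1)).sum = (A.take i).sum + A[i] := List.sum_take_succ A i hi
    have hP : (pvPrefix 0 A).drop i = pvPrefix ((A.take i).sum) (A.drop i) := by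
      rw [pvPrefix_drop]; congr 1; ring
    have hP1 : (pvPrefix 0 A).drop (i + 1)
        = pvPrefix ((A.take i).sum + A[i]) (A.drop (i + 1)) := by
      rw [pvPrefix_drop]; congr 1; rw [← hsum]; ring
    have hPcons : (pvPrefix 0 A).drop i
        = ((A.take i).sum + A[i]) :: pvPrefix ((A.take i).sum + A[i]) (A.drop (i + 1)) := by
      rw [hP, hdropA]; rfl
    have hPlen : ((pvPrefix 0 A).drop i).length = A.length - i := by
      rw [List.length_drop, pvPrefix_length]
    have hPne : pvPrefix 0 A ≠ [] := by
      intro h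
      have := pvPrefix_length A 0
      rw [h] at this
      simp at this
      omega
    -- characterise the segment-tree query as a linear scan on the dropped prefix list
    have h1 : pvFirstAbove (pvBuild 1 (pvPrefix 0 A)) (i + 1) ((A.take i).sum + B)
        = pvFind 1 (i + 1) ((A.take i).sum + B) (pvPrefix 0 A) :=
      pvFirstAbove_build (pvPrefix 0 A).length _ le_rfl hPne 1 (i + 1) _
    have h2 : pvFind 1 (i + 1) ((A.take i).sum + B) (pvPrefix 0 A)
        = pvFind (1 + i) (i + 1) ((A.take i).sum + B) ((pvPrefix 0 A).drop i) :=
      pvFind_skip i _ 1 (i + 1) _ (by omega)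
    have h3 := pvFind_getD ((pvPrefix 0 A).drop i) (1 + i) (i + 1) ((A.take i).sum + B) (by omega)
    have hdefault : (1 + i) + ((pvPrefix 0 A).drop i).length = A.length + 1 := by
      rw [hPlen]; omega
    have hk : (pvFind 1 (i + 1) ((A.take i).sum + B) (pvPrefix 0 A)).getD (A.length + 1)
        = (1 + i) + (((pvPrefix 0 A).drop i).takeWhile
            (fun v => decide (v ≤ (A.take i).sum + B))).length := by
      rw [h2, ← hdefault]; exact h3
    -- the scan length is A's inner count
    have hshift : pvPrefix ((A.take i).sum) (A.drop i)
        = (pvPrefix 0 (A.drop i)).map (· + (A.take i).sum) := by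
      have := pvPrefix_shift (A.drop i) ((A.take i).sum) 0
      simpa using this
    have hL : pvInnerA B 0 (A.drop i)
        = ((((pvPrefix 0 A).drop i).takeWhile
            (fun v => decide (v ≤ (A.take i).sum + B))).length : Int) := by
      rw [hP, hshift, takeWhile_map_length, ← pvInnerA_eq]
    -- unfold one step of B's loop against one step of A's outer loop
    rw [hPcons]
    simp only [pvLoopB, h1]
    rw [hPcons] at hk
    rw [hk]
    have hrec := ih A B (i + 1) (by omega) (by omega) hne
    rw [hsum, hP1] at hrec
    rw [hrec]
    conv_rhs => rw [hdropA]
    simp only [pvOuterA]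
    rw [← hdropA, hL, hPcons]
    push_cast
    ring

-- ===== VERDICT (by name: the statement is the Claim_ definition above) =====
theorem max_subarray_count_spec : Claim_equal_max_subarray_count := by
  intro A B _
  unfold Spec_max_subarray_count max_subarray_count max_subarray_count_alt
  match A with
  | [] => rfl
  | a :: rest =>
    have h := pvLoop_eq (a :: rest).length (a :: rest) B 0 (by simp) (by simp) (by simp)
    simpa using h.symm
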